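-- pv_equiv track=rewrite | github.com/ywz978020607/History | cv研究生日常Lab/my_code/毕设/MFQEv2.0_test_qp/main_test_timeline_ywz1.py | return_PQFIndices
-- ===== SOURCE A (Python) =====
-- def return_PQFIndices(PQF_label, QP, ApprQP_label):
--     """Find all PQFs and their pre/sub PQFs pertain to this QP."""
--
--     PQF_indices = [i for i in range(len(PQF_label)) if PQF_label[i] == 1]
--
--     ApprQPLabel_PQF = [ApprQP_label[i] for i in range(len(ApprQP_label)) if i in PQF_indices]
--
--     PQF_order_part = [o for o in range(len(ApprQPLabel_PQF)) if ApprQPLabel_PQF[o] == QP]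
--     PQFIndex_list_part = [PQF_indices[o] for o in range(len(PQF_indices)) if o in PQF_order_part]
--
--     if len(PQFIndex_list_part) == 0:
--         return [],[],[]
--
--     num_PQF = len(PQFIndex_list_part)
--
--     CmpPQFIndex_list_part = PQFIndex_list_part.copy()
--     PrePQFIndex_list_part = PQFIndex_list_part[0: (num_PQF - 1)]
--     SubPQFIndex_list_part = PQFIndex_list_part[1: num_PQF]
--
--     PrePQFIndex_list_part = [PQFIndex_list_part[0]] + PrePQFIndex_list_part
--     SubPQFIndex_list_part.append(PQFIndex_list_part[-1])
--
--     return PrePQFIndex_list_part, CmpPQFIndex_list_part, SubPQFIndex_list_part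
-- ===== SOURCE B (Python) =====
-- def return_PQFIndices(PQF_label, QP, ApprQP_label):
--     """Find all PQFs and their pre/sub PQFs pertain to this QP."""
--     m = len(ApprQP_label)
--     matched = [i for i, lab in enumerate(PQF_label)
--                if lab == 1 and i < m and ApprQP_label[i] == QP]
--     if not matched:
--         return [], [], []
--     return [matched[0]] + matched[:-1], list(matched), matched[1:] + [matched[-1]]
-- ===== Notes on version B (the rewrite author's own statement) =====
-- stated objective: simpler
-- what changed: One direct single-pass scan over enumerate(PQF_label) with the combined predicate (label==1, index within ApprQP_label, QP match) replaces A's three staged passes that build PQF_indices, ApprQPLabel_PQF via cross-membership, PQF_order_part and then re-index; pre/cmp/sub are assembled straight from the matched list.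
import Mathlib
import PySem

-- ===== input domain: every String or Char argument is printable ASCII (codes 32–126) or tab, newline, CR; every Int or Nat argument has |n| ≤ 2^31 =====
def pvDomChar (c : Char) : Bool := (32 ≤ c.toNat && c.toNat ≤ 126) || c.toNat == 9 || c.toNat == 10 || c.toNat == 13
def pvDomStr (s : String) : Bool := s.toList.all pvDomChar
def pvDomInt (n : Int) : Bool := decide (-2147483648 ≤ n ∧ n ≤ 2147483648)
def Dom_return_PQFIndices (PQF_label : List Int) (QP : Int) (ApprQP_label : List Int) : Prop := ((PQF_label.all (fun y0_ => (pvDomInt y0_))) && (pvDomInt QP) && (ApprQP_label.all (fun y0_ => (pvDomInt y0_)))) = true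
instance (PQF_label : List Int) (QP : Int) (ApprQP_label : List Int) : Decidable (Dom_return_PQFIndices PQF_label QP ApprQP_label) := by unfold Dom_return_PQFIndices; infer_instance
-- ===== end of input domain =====

-- B replaces A's three staged membership/cross-index passes by one direct single-pass
-- predicate scan; return values only (neither program mutates its arguments).

-- B replaces A's three staged membership/cross-index passes by one direct single-pass
-- predicate scan over enumerate(PQF_label); return values only (no argument is mutated).

-- ===== PORT A =====
def return_PQFIndices (PQF_label : List Int) (QP : Int) (ApprQP_label : List Int) : List Int × List Int × List Int :=
  let PQF_indices := (PySem.List.pyRange 0 PQF_label.length 1).filter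
      (fun i => PySem.List.pyGetD PQF_label i 0 == 1)
  let ApprQPLabel_PQF := ((PySem.List.pyRange 0 ApprQP_label.length 1).filter
      (fun i => PQF_indices.contains i)).map (fun i => PySem.List.pyGetD ApprQP_label i 0)
  let PQF_order_part := (PySem.List.pyRange 0 ApprQPLabel_PQF.length 1).filter
      (fun o => PySem.List.pyGetD ApprQPLabel_PQF o 0 == QP)
  let PQFIndex_list_part := ((PySem.List.pyRange 0 PQF_indices.length 1).filter
      (fun o => PQF_order_part.contains o)).map (fun o => PySem.List.pyGetD PQF_indices o 0)
  if PQFIndex_list_part.length = 0 then ([], [], [])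
  else
    let num_PQF : Int := PQFIndex_list_part.length
    let CmpPQFIndex_list_part := PQFIndex_list_part
    let PrePQFIndex_list_part := PySem.List.slice PQFIndex_list_part (some 0) (some (num_PQF - 1))
    let SubPQFIndex_list_part := PySem.List.slice PQFIndex_list_part (some 1) (some num_PQF)
    let PrePQFIndex_list_part := [PySem.List.pyGetD PQFIndex_list_part 0 0] ++ PrePQFIndex_list_part
    let SubPQFIndex_list_part := SubPQFIndex_list_part ++ [PySem.List.pyGetD PQFIndex_list_part (-1) 0]
    (PrePQFIndex_list_part, CmpPQFIndex_list_part, SubPQFIndex_list_part)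

-- ===== PORT B =====
-- the guard 'i < len(ApprQP_label) and ApprQP_label[i] == QP' is exactly
-- 'pyGet? ApprQP_label i == some QP' since indices from enumerate are nonnegative
def return_PQFIndices_alt (PQF_label : List Int) (QP : Int) (ApprQP_label : List Int) : List Int × List Int × List Int :=
  let matched := ((PySem.List.enumerate PQF_label 0).filter
      (fun il => il.2 == 1 && (PySem.List.pyGet? ApprQP_label il.1 == some QP))).map (fun il => il.1)
  match matched with
  | [] => ([], [], [])
  | m0 :: rest =>
      (m0 :: (m0 :: rest).dropLast, m0 :: rest,
       rest ++ [(m0 :: rest).getLast (by simp)])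

-- ===== PRECONDITION & SPEC =====
def Spec_return_PQFIndices (PQF_label : List Int) (QP : Int) (ApprQP_label : List Int) (out : List Int × List Int × List Int) : Prop := out = return_PQFIndices_alt PQF_label QP ApprQP_label
instance (PQF_label : List Int) (QP : Int) (ApprQP_label : List Int) (out : List Int × List Int × List Int) : Decidable (Spec_return_PQFIndices PQF_label QP ApprQP_label out) := by unfold Spec_return_PQFIndices; infer_instance

-- ===== CLAIM (what is proved, stated in full; the proofs are below) =====
def Claim_equal_return_PQFIndices : Prop := ∀ (PQF_label : List Int) (QP : Int) (ApprQP_label : List Int), Dom_return_PQFIndices PQF_label QP ApprQP_label → Spec_return_PQFIndices PQF_label QP ApprQP_label (return_PQFIndices PQF_label QP ApprQP_label)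

-- ===== LEMMAS AND PROOFS =====
theorem pv_sorted_ext {l1 l2 : List Int} (h1 : l1.Pairwise (· < ·)) (h2 : l2.Pairwise (· < ·))
    (hm : ∀ x, x ∈ l1 ↔ x ∈ l2) : l1 = l2 := by
  refine List.Perm.eq_of_pairwise ?_ h1 h2
    ((List.perm_ext_iff_of_nodup (h1.imp ne_of_lt) (h2.imp ne_of_lt)).mpr hm)
  intro a b _ _ hab hba; exact absurd hba (not_lt.mpr hab.le)

theorem pv_range_filter_contains (m : Int) (L : List Int) (h : L.Pairwise (· < ·))
    (hpos : ∀ x ∈ L, 0 ≤ x) :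
    (PySem.List.pyRange 0 m 1).filter (fun i => L.contains i)
      = L.filter (fun i => decide (i < m)) := by
  apply pv_sorted_ext ((PySem.List.pairwise_lt_pyRange_one 0 m).filter _) (h.filter _)
  intro x
  simp only [List.mem_filter, PySem.List.mem_pyRange_one, decide_eq_true_eq,
    List.contains_iff_mem]
  constructor
  · rintro ⟨⟨_, hxm⟩, hxL⟩; exact ⟨hxL, hxm⟩
  · rintro ⟨hxL, hxm⟩; exact ⟨⟨hpos x hxL, hxm⟩, hxL⟩

theorem pv_filter_lt_prefix (m : Int) : ∀ (L : List Int), L.Pairwise (· < ·) →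
    (L.filter (fun i => decide (i < m))) <+: L := by
  intro L h
  induction L with
  | nil => simp
  | cons a t ih =>
    rw [List.pairwise_cons] at h
    by_cases ha : a < m
    · simp only [List.filter_cons, ha, decide_true, if_true]
      obtain ⟨r, hr⟩ := ih h.2
      exact ⟨r, by simp [hr]⟩
    · have hnil : t.filter (fun i => decide (i < m)) = [] := by
        rw [List.filter_eq_nil_iff]
        intro x hx
        simp only [decide_eq_true_eq]
        exact fun hxm => ha (lt_trans (h.1 x hx) hxm)
      simp [ha, hnil]

theorem pv_range_filter_map (q : Int → Bool) (d : Int) : ∀ (ys : List Int),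
    (((PySem.List.pyRange 0 ys.length 1).filter
        (fun o => q (PySem.List.pyGetD ys o d))).map
      (fun o => PySem.List.pyGetD ys o d)) = ys.filter q := by
  intro ys
  induction ys using List.reverseRecOn with
  | nil => simp
  | append_singleton ys y ih =>
    have hlen : ((ys ++ [y]).length : Int) = (ys.length : Int) + 1 := by simp
    rw [hlen, PySem.List.pyRange_one_succ_right (by positivity)]
    have hpre : ∀ o ∈ PySem.List.pyRange 0 (ys.length : Int) 1,
        PySem.List.pyGetD (ys ++ [y]) o d = PySem.List.pyGetD ys o d := by
      intro o ho
      rw [PySem.List.mem_pyRange_one] at ho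
      have h1 : o < ((ys ++ [y]).length : Int) := by
        simp only [List.length_append, List.length_cons, List.length_nil]
        push_cast; omega
      rw [PySem.List.pyGetD_eq_getElem _ d ho.1 h1,
        PySem.List.pyGetD_eq_getElem _ d ho.1 ho.2,
        List.getElem_append_left]
    have hlast : PySem.List.pyGetD (ys ++ [y]) (ys.length : Int) d = y := by
      rw [PySem.List.pyGetD_eq_getElem _ d (by positivity) (by simp)]
      simp
    rw [List.filter_append, List.map_append,
      List.filter_congr (fun o ho => by rw [hpre o ho]),
      List.map_congr_left (fun o ho => hpre o (List.mem_filter.mp ho).1), ih]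
    by_cases hq : q y
    · simp [hlast, hq]
    · simp [hlast, hq]

def pvMatched (P : List Int) (QP : Int) (Appr : List Int) : List Int :=
  (((PySem.List.pyRange 0 P.length 1).filter (fun i => PySem.List.pyGetD P i 0 == 1)).filter
     (fun i => decide (i < (Appr.length : Int)))).filter
    (fun i => PySem.List.pyGetD Appr i 0 == QP)

def pvAssemble (l : List Int) : List Int × List Int × List Int :=
  match l with
  | [] => ([], [], [])
  | a :: t => (a :: (a :: t).dropLast, a :: t, t ++ [(a :: t).getLast (by simp)])

theorem pv_A_eq (P : List Int) (QP : Int) (Appr : List Int) :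
    return_PQFIndices P QP Appr = pvAssemble (pvMatched P QP Appr) := by
  simp only [return_PQFIndices]
  set idx := List.filter (fun i => PySem.List.pyGetD P i 0 == 1)
      (PySem.List.pyRange 0 (P.length : Int)) with hidx
  have hpw : idx.Pairwise (· < ·) := (PySem.List.pairwise_lt_pyRange_one 0 _).filter _
  have hmem : ∀ x ∈ idx, 0 ≤ x ∧ x < (P.length : Int) := by
    intro x hx
    have := (List.mem_filter.mp hx).1
    rwa [PySem.List.mem_pyRange_one] at this
  rw [pv_range_filter_contains _ idx hpw (fun x hx => (hmem x hx).1)]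
  set F := idx.filter (fun i => decide (i < (Appr.length : Int))) with hF
  have hFpre : F <+: idx := pv_filter_lt_prefix _ idx hpw
  have e2 : List.filter
        (fun o => PySem.List.pyGetD (List.map (fun i => PySem.List.pyGetD Appr i 0) F) o 0 == QP)
        (PySem.List.pyRange 0 ((List.map (fun i => PySem.List.pyGetD Appr i 0) F).length : Int))
      = List.filter (fun o => PySem.List.pyGetD Appr (PySem.List.pyGetD F o 0) 0 == QP)
        (PySem.List.pyRange 0 (F.length : Int)) := by
    rw [List.length_map]
    apply List.filter_congr
    intro o ho
    rw [PySem.List.mem_pyRange_one] at ho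
    have hoF : o < ((List.map (fun i => PySem.List.pyGetD Appr i 0) F).length : Int) := by
      rw [List.length_map]; exact ho.2
    rw [PySem.List.pyGetD_eq_getElem _ 0 ho.1 hoF, PySem.List.pyGetD_eq_getElem _ 0 ho.1 ho.2,
      List.getElem_map]
  rw [e2]
  set ord := List.filter (fun o => PySem.List.pyGetD Appr (PySem.List.pyGetD F o 0) 0 == QP)
      (PySem.List.pyRange 0 (F.length : Int)) with hord
  have hordmem : ∀ o ∈ ord, 0 ≤ o ∧ o < (F.length : Int) := by
    intro o ho
    have := (List.mem_filter.mp ho).1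
    rwa [PySem.List.mem_pyRange_one] at this
  have hordpw : ord.Pairwise (· < ·) := (PySem.List.pairwise_lt_pyRange_one 0 _).filter _
  rw [pv_range_filter_contains _ ord hordpw (fun x hx => (hordmem x hx).1)]
  have e3 : ord.filter (fun i => decide (i < (idx.length : Int))) = ord := by
    apply List.filter_eq_self.mpr
    intro o ho
    have hFlen : F.length ≤ idx.length := List.length_filter_le _ _
    simp only [decide_eq_true_eq]
    exact lt_of_lt_of_le (hordmem o ho).2 (by exact_mod_cast hFlen)
  rw [e3]
  have e4 : ord.map (fun o => PySem.List.pyGetD idx o 0)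
      = ord.map (fun o => PySem.List.pyGetD F o 0) := by
    apply List.map_congr_left
    intro o ho
    obtain ⟨ho0, hoF⟩ := hordmem o ho
    have hoidx : o < (idx.length : Int) := by
      have := List.length_filter_le (fun i => decide (i < (Appr.length : Int))) idx
      calc o < (F.length : Int) := hoF
        _ ≤ _ := by exact_mod_cast this
    rw [PySem.List.pyGetD_eq_getElem _ 0 ho0 hoidx, PySem.List.pyGetD_eq_getElem _ 0 ho0 hoF]
    exact (List.IsPrefix.getElem hFpre _).symm
  rw [e4, hord, pv_range_filter_map (fun v => PySem.List.pyGetD Appr v 0 == QP) 0 F]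
  have hM : pvMatched P QP Appr = F.filter (fun v => PySem.List.pyGetD Appr v 0 == QP) := by
    rw [pvMatched, ← hidx, ← hF]
  rw [← hM]
  generalize pvMatched P QP Appr = l
  cases l with
  | nil => simp [pvAssemble]
  | cons a t =>
    simp only [List.length_cons, Nat.succ_ne_zero, if_false, pvAssemble]
    have hgl : PySem.List.pyGetD (a :: t) (-1) 0 = (a :: t).getLast (by simp) :=
      PySem.List.pyGetD_neg_one _ _ (by simp)
    simp [hgl, PySem.List.pyGetD_zero_cons]
    constructor
    · rw [List.dropLast_eq_take]; simp
    · rw [PySem.List.slice_toNat _ (by omega) (by omega)]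
      have h2 : ((t.length : Int) + 1).toNat = t.length + 1 := by omega
      rw [h2]
      simp

theorem pv_B_eq (P : List Int) (QP : Int) (Appr : List Int) :
    return_PQFIndices_alt P QP Appr = pvAssemble (pvMatched P QP Appr) := by
  simp only [return_PQFIndices_alt]
  have hmatched : ((PySem.List.enumerate P 0).filter
        (fun il => il.2 == 1 && (PySem.List.pyGet? Appr il.1 == some QP))).map (fun il => il.1)
      = pvMatched P QP Appr := by
    rw [PySem.List.enumerate_eq_map_pyRange P 0, PySem.List.len_eq, List.filter_map,
      List.map_map]
    have hid : ∀ l : List Int, l.map ((fun (il : Int × Int) => il.1) ∘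
        (fun j => (j, PySem.List.pyGetD P j 0))) = l := by
      intro l; simp [Function.comp_def]
    rw [hid]
    have step1 : List.filter ((fun il : Int × Int => il.2 == 1 &&
            (PySem.List.pyGet? Appr il.1 == some QP)) ∘ fun j => (j, PySem.List.pyGetD P j 0))
          (PySem.List.pyRange 0 (P.length : Int))
        = List.filter (fun j => PySem.List.pyGet? Appr j == some QP)
            (List.filter (fun j => PySem.List.pyGetD P j 0 == 1)
              (PySem.List.pyRange 0 (P.length : Int))) := by
      rw [List.filter_filter]
      apply List.filter_congr
      intro a _
      simp [Function.comp, Bool.and_comm]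
    rw [step1]
    simp only [pvMatched]
    conv_rhs => rw [List.filter_filter]
    apply List.filter_congr
    intro j hj
    have hj0 : 0 ≤ j := by
      have := (List.mem_filter.mp hj).1
      rw [PySem.List.mem_pyRange_one] at this
      exact this.1
    by_cases hjm : j < (Appr.length : Int)
    · rw [PySem.List.pyGet?_eq_some_getElem Appr hj0 hjm,
        PySem.List.pyGetD_eq_getElem Appr 0 hj0 hjm]
      simp [hjm]
    · rw [(PySem.List.pyGet?_eq_none_iff Appr j).mpr (fun h => hjm h.2)]
      simp [hjm]
  rw [hmatched]
  generalize pvMatched P QP Appr = l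
  cases l <;> rfl

-- ===== VERDICT (by name: the statement is the Claim_ definition above) =====
theorem return_PQFIndices_spec : Claim_equal_return_PQFIndices := by
  intro P QP Appr _
  unfold Spec_return_PQFIndices
  rw [pv_A_eq, pv_B_eq]
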